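-- pv_equiv track=rewrite | github.com/devashishkatoriya/nsga-ii-algorithm | crowding_distance.py | get_original_distance
-- ===== SOURCE A (Python) =====
-- def get_original_distance(pop, pop_changed, distance):
--     """Function to get distance for original population
--
--     Arguments:
--         pop {[matrix]} -- original population
--         pop_changed {[matrix]} -- shuffled population
--         distance {[vector]} -- distance vector for shuffled population
--
--     Returns:
--         distance -- distance in correct order
--     """
--
--     distance2 = []
--     done = []
--     l2 = len(distance)
--
--     for i in range(0, l2):
--         done.append(False)
--
--     for i in pop:
--         for j in range(0, l2):
--             if i == pop_changed[j] and done[j] == False: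
--                 distance2.append(distance[j])
--                 done[j] = True
--                 break
--
--     return distance2
-- ===== SOURCE B (Python) =====
-- def get_original_distance(pop, pop_changed, distance):
--     """Reorder distance to original population order: bucket the shuffled
--     distances by row (hashed as a tuple) and pop the earliest unused one
--     per original row, instead of rescanning the shuffled population."""
--     buckets = {}
--     for row, d in zip(pop_changed, distance):
--         buckets.setdefault(tuple(row), []).append(d)
--     for q in buckets.values():
--         q.reverse()          # so q.pop() yields the earliest remaining index
--     out = []
--     for row in pop:
--         q = buckets.get(tuple(row))
--         if q:
--             out.append(q.pop())
--     return out
-- ===== Notes on version B (the rewrite author's own statement) =====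
-- stated objective: faster
-- what changed: Replaces A's per-row linear rescan over the whole shuffled population (with a done-flag array) by a hash map built once from row to the queue of its distances, popped in order per original row.
-- outside the precondition, e.g. on get_original_distance([[1]], [[1]], [5, 6]): A returns [5], B returns [5]
import Mathlib
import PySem

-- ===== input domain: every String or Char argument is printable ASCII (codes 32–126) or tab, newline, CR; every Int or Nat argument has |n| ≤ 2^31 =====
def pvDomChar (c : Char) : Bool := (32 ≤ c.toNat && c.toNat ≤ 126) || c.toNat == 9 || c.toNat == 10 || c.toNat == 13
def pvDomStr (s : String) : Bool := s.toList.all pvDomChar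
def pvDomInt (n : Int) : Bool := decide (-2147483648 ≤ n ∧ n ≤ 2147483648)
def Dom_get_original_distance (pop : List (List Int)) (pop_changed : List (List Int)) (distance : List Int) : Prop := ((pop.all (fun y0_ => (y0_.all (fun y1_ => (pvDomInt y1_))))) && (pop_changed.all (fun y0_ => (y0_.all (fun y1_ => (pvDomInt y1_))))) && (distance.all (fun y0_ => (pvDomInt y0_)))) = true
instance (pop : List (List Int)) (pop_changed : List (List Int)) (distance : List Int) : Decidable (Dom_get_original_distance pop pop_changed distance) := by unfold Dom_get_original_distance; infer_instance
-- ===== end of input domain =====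

-- B replaces A's quadratic per-row rescan of the shuffled population by a hash map
-- (row -> its distances in order) built once; return value only, no argument is mutated.

-- ===== PORT A =====
-- inner loop 'for j in range(0, l2): if i == pop_changed[j] and done[j] == False: …; break'
-- (pyGet? = none is where Python's pop_changed[j] would raise IndexError; excluded by Pre_)
def pvInnerA (i : List Int) (pop_changed : List (List Int)) (distance : List Int) :
    List Int → List Int → List Bool → List Int × List Bool
  | [], distance2, done => (distance2, done)
  | j :: js, distance2, done =>
    if PySem.List.pyGet? pop_changed j = some i ∧ PySem.List.pyGetD done j true = false then
      (distance2 ++ [PySem.List.pyGetD distance j 0], PySem.List.pySetD done j true)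
    else
      pvInnerA i pop_changed distance js distance2 done

-- outer loop 'for i in pop: …'
def pvOuterA (pop_changed : List (List Int)) (distance : List Int) (l2 : Int) :
    List (List Int) → List Int → List Bool → List Int
  | [], distance2, _ => distance2
  | i :: rest, distance2, done =>
    let r := pvInnerA i pop_changed distance (PySem.List.pyRange 0 l2 1) distance2 done
    pvOuterA pop_changed distance l2 rest r.1 r.2

def get_original_distance (pop : List (List Int)) (pop_changed : List (List Int)) (distance : List Int) : List Int :=
  let l2 : Int := distance.length
  -- 'for i in range(0, l2): done.append(False)'
  let done := (PySem.List.pyRange 0 l2 1).foldl (fun acc _ => acc ++ [false]) []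
  pvOuterA pop_changed distance l2 pop [] done

-- ===== PORT B =====
-- 'for row in pop: q = buckets.get(tuple(row)); if q: out.append(q.pop())'
def pvLoopB : List (List Int) → PySem.Dict (List Int) (List Int) → List Int
  | [], _ => []
  | row :: rest, buckets =>
    match buckets.get? row with
    | some q =>
      match PySem.List.pop? q with   -- q.pop(): none exactly when q is empty ('if q:')
      | some (d, q') => d :: pvLoopB rest (buckets.insert row q')
      | none => pvLoopB rest buckets
    | none => pvLoopB rest buckets

def get_original_distance_alt (pop : List (List Int)) (pop_changed : List (List Int)) (distance : List Int) : List Int :=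
  -- 'for row, d in zip(pop_changed, distance): buckets.setdefault(tuple(row), []).append(d)'
  let buckets := (pop_changed.zip distance).foldl
      (fun d p => d.modify p.1 [] (fun q => q ++ [p.2])) PySem.Dict.empty
  -- 'for q in buckets.values(): q.reverse()' — in-place reversal of every value
  let buckets := PySem.Dict.mk (buckets.items.map (fun p => (p.1, p.2.reverse)))
  pvLoopB pop buckets

-- ===== PRECONDITION & SPEC =====
-- Pre_ excludes inputs where distance is longer than pop_changed (unless pop is empty):
-- there A's scan over range(len(distance)) can index past the end of pop_changed and
-- raise IndexError. On the remaining such inputs (every row of pop matches before the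
-- scan reaches the end of pop_changed) A returns, and B returns the same value.
def Pre_get_original_distance (pop : List (List Int)) (pop_changed : List (List Int)) (distance : List Int) : Prop :=
  distance.length ≤ pop_changed.length ∨ pop = []
instance (pop : List (List Int)) (pop_changed : List (List Int)) (distance : List Int) : Decidable (Pre_get_original_distance pop pop_changed distance) := by unfold Pre_get_original_distance; infer_instance

def pvWitness_get_original_distance : List (List Int) × List (List Int) × List Int :=
  ([[1], [2]], [[2], [1]], [5, 7])

def Spec_get_original_distance (pop : List (List Int)) (pop_changed : List (List Int)) (distance : List Int) (out : List Int) : Prop := out = get_original_distance_alt pop pop_changed distance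
instance (pop : List (List Int)) (pop_changed : List (List Int)) (distance : List Int) (out : List Int) : Decidable (Spec_get_original_distance pop pop_changed distance out) := by unfold Spec_get_original_distance; infer_instance

-- ===== CLAIM (what is proved, stated in full; the proofs are below) =====
def Claim_equal_get_original_distance : Prop := ∀ (pop : List (List Int)) (pop_changed : List (List Int)) (distance : List Int), Dom_get_original_distance pop pop_changed distance → Pre_get_original_distance pop pop_changed distance → Spec_get_original_distance pop pop_changed distance (get_original_distance pop pop_changed distance)

-- ===== LEMMAS AND PROOFS =====

-- Common reference model: process pop against the pair list zip(pop_changed, distance),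
-- extracting the first remaining pair that matches each row.
def pvExtract (i : List Int) : List (List Int × Int) → Option (Int × List (List Int × Int))
  | [] => none
  | p :: t => if p.1 = i then some (p.2, t)
              else (pvExtract i t).map (fun r => (r.1, p :: r.2))

def pvMid : List (List Int) → List (List Int × Int) → List Int
  | [], _ => []
  | i :: rest, ps =>
    match pvExtract i ps with
    | some (d, ps') => d :: pvMid rest ps'
    | none => pvMid rest ps

-- A-side view of the state: the pairs whose done-flag is still false
def pvAvail : List (List Int × Int) → List Bool → List (List Int × Int)
  | p :: ms, b :: bs => if b then pvAvail ms bs else p :: pvAvail ms bs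
  | _, _ => []

-- index of the first available matching pair
def pvFind (i : List Int) : List (List Int × Int) → List Bool → Option Nat
  | p :: ms, b :: bs =>
    if p.1 = i ∧ b = false then some 0 else (pvFind i ms bs).map (· + 1)
  | _, _ => none

-- B-side view of the state: the distances still bucketed under key k
def pvSel (k : List Int) (ps : List (List Int × Int)) : List Int :=
  (ps.filter (fun p => p.1 == k)).map (fun p => p.2)

lemma pvFind_extract (i : List Int) : ∀ (ms : List (List Int × Int)) (bs : List Bool),
    ms.length = bs.length →
    (match pvFind i ms bs with
     | none => pvExtract i (pvAvail ms bs) = none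
     | some r => r < ms.length ∧
         pvExtract i (pvAvail ms bs) = some ((ms.getD r ([], 0)).2, pvAvail ms (bs.set r true))) := by
  intro ms
  induction ms with
  | nil => intro bs _; simp [pvFind, pvAvail, pvExtract]
  | cons p t ih =>
    intro bs hlen
    cases bs with
    | nil => simp at hlen
    | cons b bt =>
      simp only [List.length_cons, Nat.succ_inj] at hlen
      by_cases hcond : p.1 = i ∧ b = false
      · obtain ⟨h1, h2⟩ := hcond
        subst h2
        simp [pvFind, h1, pvAvail, pvExtract]
      · simp only [pvFind, if_neg hcond]
        have ihh := ih bt hlen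
        cases hf : pvFind i t bt with
        | none =>
          rw [hf] at ihh
          cases b with
          | true => simpa [pvAvail] using ihh
          | false =>
            have hp : ¬ p.1 = i := by
              intro hpi; exact hcond ⟨hpi, rfl⟩
            simp [pvAvail, pvExtract, hp, ihh]
        | some r =>
          rw [hf] at ihh
          obtain ⟨hr, hext⟩ := ihh
          cases b with
          | true =>
            refine ⟨by simpa using Nat.succ_lt_succ hr, ?_⟩
            simpa [pvAvail, List.set] using hext
          | false =>
            have hp : ¬ p.1 = i := by
              intro hpi; exact hcond ⟨hpi, rfl⟩
            refine ⟨by simpa using Nat.succ_lt_succ hr, ?_⟩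
            simp [pvAvail, pvExtract, hp, hext, List.set]

lemma pvInnerA_spec (i : List Int) (pop_changed : List (List Int)) (distance : List Int)
    (hle : distance.length ≤ pop_changed.length) :
    ∀ (j0 : Nat) (d2 : List Int) (done : List Bool),
    done.length = distance.length → j0 ≤ distance.length →
    pvInnerA i pop_changed distance (PySem.List.pyRange (j0 : Int) (distance.length : Int) 1) d2 done =
      (match pvFind i ((pop_changed.zip distance).drop j0) (done.drop j0) with
       | none => (d2, done)
       | some r => (d2 ++ [((pop_changed.zip distance).getD (j0 + r) ([], 0)).2], done.set (j0 + r) true)) := by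
  have hM : (pop_changed.zip distance).length = distance.length := by
    simp [List.length_zip]; omega
  suffices h : ∀ (n : Nat) (j0 : Nat) (d2 : List Int) (done : List Bool),
      done.length = distance.length → j0 ≤ distance.length → distance.length - j0 = n →
      pvInnerA i pop_changed distance (PySem.List.pyRange (j0 : Int) (distance.length : Int) 1) d2 done =
      (match pvFind i ((pop_changed.zip distance).drop j0) (done.drop j0) with
       | none => (d2, done)
       | some r => (d2 ++ [((pop_changed.zip distance).getD (j0 + r) ([], 0)).2], done.set (j0 + r) true)) by
    intro j0 d2 done h1 h2
    exact h (distance.length - j0) j0 d2 done h1 h2 rfl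
  intro n
  induction n with
  | zero =>
    intro j0 d2 done hdl hj0 hn
    have hj : j0 = distance.length := by omega
    subst hj
    rw [PySem.List.pyRange_one_eq_nil (by exact_mod_cast le_refl _)]
    rw [List.drop_eq_nil_of_le (by omega), List.drop_eq_nil_of_le (by omega)]
    rfl
  | succ n ihn =>
    intro j0 d2 done hdl hj0 hn
    have hj : j0 < distance.length := by omega
    have hjM : j0 < (pop_changed.zip distance).length := by omega
    have hjd : j0 < done.length := by omega
    rw [PySem.List.pyRange_one_cons (by exact_mod_cast hj)]
    rw [List.drop_eq_getElem_cons hjM, List.drop_eq_getElem_cons hjd]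
    have hget : PySem.List.pyGet? pop_changed ((j0 : Nat) : Int) = some (pop_changed[j0]'(by omega)) := by
      rw [PySem.List.pyGet?_natCast]
      exact List.getElem?_eq_getElem (by omega)
    have hgetd : PySem.List.pyGetD done ((j0 : Nat) : Int) true = done[j0] := by
      rw [PySem.List.pyGetD_natCast]
      exact List.getD_eq_getElem done true hjd
    have hMget : (pop_changed.zip distance)[j0]'hjM = (pop_changed[j0]'(by omega), distance[j0]'hj) :=
      List.getElem_zip
    by_cases hcond : pop_changed[j0]'(by omega) = i ∧ done[j0] = false
    · obtain ⟨hc1, hc2⟩ := hcond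
      simp only [pvInnerA, hget, hgetd, hc1, hc2, and_self, if_pos]
      have hfind : pvFind i ((pop_changed.zip distance)[j0]'hjM :: (pop_changed.zip distance).drop (j0+1))
          (false :: done.drop (j0+1)) = some 0 := by
        simp [pvFind, hMget, hc1]
      rw [hfind]
      simp only [Nat.add_zero, Prod.mk.injEq]
      constructor
      · rw [PySem.List.pyGetD_natCast, List.getD_eq_getElem distance 0 hj,
            List.getD_eq_getElem _ _ hjM, hMget]
      · rw [PySem.List.pySetD_natCast]
    · simp only [pvInnerA, hget, hgetd]
      rw [if_neg (by
        intro hcc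
        apply hcond
        exact ⟨by simpa using hcc.1, hcc.2⟩)]
      have hstep : ((j0 : Int) + 1) = ((j0 + 1 : Nat) : Int) := by push_cast; ring
      rw [hstep, ihn (j0+1) d2 done hdl (by omega) (by omega)]
      have hfind : pvFind i ((pop_changed.zip distance)[j0]'hjM :: (pop_changed.zip distance).drop (j0+1))
          (done[j0] :: done.drop (j0+1)) =
          (pvFind i ((pop_changed.zip distance).drop (j0+1)) (done.drop (j0+1))).map (· + 1) := by
        rw [pvFind, if_neg (by rw [hMget]; exact hcond)]
      rw [hfind]
      cases pvFind i ((pop_changed.zip distance).drop (j0+1)) (done.drop (j0+1)) with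
      | none => rfl
      | some r =>
        simp only [Option.map_some]
        have : j0 + 1 + r = j0 + (r + 1) := by omega
        rw [this]

lemma pvOuterA_mid (pop_changed : List (List Int)) (distance : List Int)
    (hle : distance.length ≤ pop_changed.length) :
    ∀ (pop : List (List Int)) (d2 : List Int) (done : List Bool),
    done.length = distance.length →
    pvOuterA pop_changed distance (distance.length : Int) pop d2 done =
      d2 ++ pvMid pop (pvAvail (pop_changed.zip distance) done) := by
  intro pop
  induction pop with
  | nil => intro d2 done _; simp [pvOuterA, pvMid]
  | cons i rest ih =>
    intro d2 done hdl
    have hinner := pvInnerA_spec i pop_changed distance hle 0 d2 done hdl (by omega)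
    simp only [List.drop_zero, Nat.cast_zero, Nat.zero_add] at hinner
    have hfe := pvFind_extract i (pop_changed.zip distance) done
      (by simp [List.length_zip]; omega)
    simp only [pvOuterA]
    cases hf : pvFind i (pop_changed.zip distance) done with
    | none =>
      rw [hf] at hinner hfe
      simp only at hinner hfe
      rw [hinner]
      simp only [pvMid, hfe]
      exact ih d2 done hdl
    | some r =>
      rw [hf] at hinner hfe
      simp only at hinner hfe
      obtain ⟨hr, hext⟩ := hfe
      rw [hinner]
      simp only [pvMid, hext]
      rw [ih _ (done.set r true) (by simp [hdl])]
      simp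

lemma pvAvail_replicate : ∀ (ms : List (List Int × Int)), pvAvail ms (List.replicate ms.length false) = ms := by
  intro ms; induction ms with
  | nil => rfl
  | cons p t ih => simpa [pvAvail, List.replicate] using ih

lemma pvA_eq_mid (pop : List (List Int)) (pop_changed : List (List Int)) (distance : List Int)
    (hle : distance.length ≤ pop_changed.length) :
    get_original_distance pop pop_changed distance = pvMid pop (pop_changed.zip distance) := by
  show pvOuterA pop_changed distance (distance.length : Int) pop []
      ((PySem.List.pyRange 0 (distance.length : Int) 1).foldl (fun acc _ => acc ++ [false]) []) = _
  have hdone : (PySem.List.pyRange 0 (distance.length : Int) 1).foldl (fun acc _ => acc ++ [false]) []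
      = List.replicate (pop_changed.zip distance).length false := by
    rw [PySem.List.foldl_append_singleton_eq_map]
    rw [List.map_const']
    congr 1
    simp [PySem.List.length_pyRange_one, List.length_zip]
    omega
  rw [hdone, pvOuterA_mid pop_changed distance hle pop []
      (List.replicate (pop_changed.zip distance).length false)
      (by simp [List.length_zip]; omega), pvAvail_replicate]
  rfl

lemma pvExtract_sel (i : List Int) : ∀ (ps : List (List Int × Int)),
    (match pvExtract i ps with
     | none => pvSel i ps = []
     | some (d, ps') => pvSel i ps = d :: pvSel i ps' ∧ ∀ k, k ≠ i → pvSel k ps' = pvSel k ps) := by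
  intro ps
  induction ps with
  | nil => simp [pvExtract, pvSel]
  | cons p t ih =>
    by_cases hp : p.1 = i
    · simp only [pvExtract, if_pos hp]
      constructor
      · simp [pvSel, List.filter_cons, hp]
      · intro k hk; simp [pvSel, List.filter_cons, hp, Ne.symm hk]
    · simp only [pvExtract, if_neg hp]
      cases he : pvExtract i t with
      | none =>
        rw [he] at ih
        simpa [pvSel, List.filter_cons, hp] using ih
      | some r =>
        obtain ⟨d, ps'⟩ := r
        rw [he] at ih
        obtain ⟨h1, h2⟩ := ih
        refine ⟨?_, ?_⟩
        · simpa [pvSel, List.filter_cons, hp] using h1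
        · intro k hk
          by_cases hpk : p.1 = k
          · simpa [pvSel, List.filter_cons, hpk] using h2 k hk
          · simpa [pvSel, List.filter_cons, hpk] using h2 k hk

lemma pvGet?_mapVal (f : List Int → List Int) :
    ∀ (l : List (List Int × List Int)) (k : List Int),
    (PySem.Dict.mk (l.map (fun p => (p.1, f p.2)))).get? k = ((PySem.Dict.mk l).get? k).map f := by
  intro l
  induction l with
  | nil => intro k; rfl
  | cons p t ih =>
    intro k
    obtain ⟨pk, pv⟩ := p
    simp only [List.map_cons, PySem.Dict.get?_mk_cons]
    by_cases h : (pk == k) = true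
    · simp [h]
    · simp [h, ih k]

lemma pvLoopB_mid : ∀ (pop : List (List Int)) (bk : PySem.Dict (List Int) (List Int))
    (ps : List (List Int × Int)),
    (∀ k, (bk.get? k).getD [] = (pvSel k ps).reverse) →
    pvLoopB pop bk = pvMid pop ps := by
  intro pop
  induction pop with
  | nil => intro bk ps _; rfl
  | cons row rest ih =>
    intro bk ps hinv
    have hsel := pvExtract_sel row ps
    cases hg : bk.get? row with
    | none =>
      have h0 : pvSel row ps = [] := by
        have h := hinv row; rw [hg] at h; simpa using h.symm
      cases he : pvExtract row ps with
      | some r =>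
        rw [he] at hsel
        obtain ⟨h1, -⟩ := hsel
        rw [h0] at h1; cases h1
      | none =>
        simp only [pvLoopB, hg, pvMid, he]
        exact ih bk ps hinv
    | some q =>
      have hq : q = (pvSel row ps).reverse := by
        have h := hinv row; rw [hg] at h; simpa using h
      rcases List.eq_nil_or_concat q with hqe | ⟨l, x, hqc⟩
      · subst hqe
        have h0 : pvSel row ps = [] := by simpa using congrArg List.reverse hq
        cases he : pvExtract row ps with
        | some r =>
          rw [he] at hsel
          obtain ⟨h1, -⟩ := hsel
          rw [h0] at h1; cases h1
        | none =>
          simp only [pvLoopB, hg, pvMid, he, PySem.List.pop?]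
          exact ih bk ps hinv
      · subst hqc
        have hsq : pvSel row ps = x :: l.reverse := by
          simpa using (congrArg List.reverse hq).symm
        cases he : pvExtract row ps with
        | none =>
          rw [he] at hsel; rw [hsq] at hsel; cases hsel
        | some r =>
          obtain ⟨d, ps'⟩ := r
          rw [he] at hsel
          obtain ⟨h1, h2⟩ := hsel
          rw [hsq] at h1
          have hd : d = x := (List.cons.injEq _ _ _ _ ▸ h1).1.symm
          have hps' : pvSel row ps' = l.reverse := ((List.cons.injEq _ _ _ _ ▸ h1).2).symm
          subst hd
          simp only [pvLoopB, hg, pvMid, he, List.concat_eq_append, PySem.List.pop?_last]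
          congr 1
          apply ih
          intro k
          by_cases hk : k = row
          · subst hk
            rw [PySem.Dict.get?_insert_self]
            simp [hps']
          · rw [PySem.Dict.get?_insert_of_ne _ _ hk, hinv k, h2 k hk]

lemma pvB_eq_mid (pop : List (List Int)) (pop_changed : List (List Int)) (distance : List Int) :
    get_original_distance_alt pop pop_changed distance = pvMid pop (pop_changed.zip distance) := by
  unfold get_original_distance_alt
  apply pvLoopB_mid
  intro k
  have hraw : ((pop_changed.zip distance).foldl
      (fun d p => d.modify p.1 [] (fun q => q ++ [p.2])) PySem.Dict.empty).getD k [] = pvSel k (pop_changed.zip distance) := by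
    rw [PySem.Dict.getD_foldl_modify_append]
    simp [pvSel, PySem.Dict.getD_empty]
  rw [pvGet?_mapVal]
  cases hg : ((pop_changed.zip distance).foldl
      (fun d p => d.modify p.1 [] (fun q => q ++ [p.2])) PySem.Dict.empty).get? k with
  | none =>
    rw [PySem.Dict.getD_eq_get?_getD, hg] at hraw
    simp at hraw
    simp [hg, hraw]
  | some v =>
    rw [PySem.Dict.getD_eq_get?_getD, hg] at hraw
    simp at hraw
    simp [hg, ← hraw]

-- ===== VERDICT (by name: the statement is the Claim_ definition above) =====
theorem get_original_distance_spec : Claim_equal_get_original_distance := by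
  intro pop pop_changed distance _ hpre
  unfold Spec_get_original_distance
  rcases hpre with hle | hnil
  · rw [pvA_eq_mid pop pop_changed distance hle, pvB_eq_mid]
  · subst hnil; rfl
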